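-- pv_equiv track=rewrite | github.com/AerdnaNami/citation_evaluation | evaluate_unsupp.py | prune_isolated_ones
-- ===== SOURCE A (Python) =====
-- from typing import List, Dict, Any, Optional
-- from typing import List
--
-- def prune_isolated_ones(binary_labels: List[int]) -> List[int]:
--     """
--     Keep a 1 only if it has a neighboring 1 (left or right).
--     """
--     n = len(binary_labels)
--     out = binary_labels[:]  # copy
--     for i in range(n):
--         if out[i] != 1:
--             continue
--         left = (i > 0 and out[i - 1] == 1)
--         right = (i < n - 1 and out[i + 1] == 1)
--         if not (left or right):
--             out[i] = 0
--     return out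
-- ===== SOURCE B (Python) =====
-- from typing import List
--
-- def prune_isolated_ones(binary_labels: List[int]) -> List[int]:
--     """
--     Keep a 1 only if it has a neighboring 1 (left or right).
--     Run-scan: group maximal runs of consecutive 1s; a run of length >= 2
--     is kept, a lone 1 becomes 0; every non-1 value is copied unchanged.
--     """
--     out: List[int] = []
--     n = len(binary_labels)
--     i = 0
--     while i < n:
--         if binary_labels[i] == 1:
--             j = i
--             while j < n and binary_labels[j] == 1:
--                 j += 1
--             run = j - i
--             if run >= 2:
--                 out.extend([1] * run)
--             else:
--                 out.append(0)
--             i = j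
--         else:
--             out.append(binary_labels[i])
--             i += 1
--     return out
-- ===== Notes on version B (the rewrite author's own statement) =====
-- stated objective: alternative
-- what changed: Replaces the index loop with in-place neighbor checks on a mutated copy by a single left-to-right run scan that groups maximal runs of consecutive 1s, emitting the run if its length is >= 2 and a single 0 otherwise, copying non-1 values through into a fresh output list.
import Mathlib
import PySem

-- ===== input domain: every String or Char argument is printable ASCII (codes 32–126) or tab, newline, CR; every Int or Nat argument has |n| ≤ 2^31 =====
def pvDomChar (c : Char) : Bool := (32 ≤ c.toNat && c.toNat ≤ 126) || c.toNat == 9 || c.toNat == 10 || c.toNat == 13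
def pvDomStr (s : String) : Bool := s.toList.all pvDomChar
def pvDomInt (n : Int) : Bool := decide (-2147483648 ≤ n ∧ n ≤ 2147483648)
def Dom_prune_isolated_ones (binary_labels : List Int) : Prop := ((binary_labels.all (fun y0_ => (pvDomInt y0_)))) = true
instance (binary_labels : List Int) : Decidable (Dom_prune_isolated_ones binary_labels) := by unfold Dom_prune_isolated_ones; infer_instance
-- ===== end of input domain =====

-- B is an alternative single-pass run scan of maximal runs of 1s; same O(n) cost, fresh output list.

-- ===== PORT A =====
-- Literal port of A: copy the list, loop i over range(n), zero out[i] if it is a 1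
-- with no neighboring 1 (left neighbor read from the mutated list, as in Python).
-- Indices produced by pyRange 0 n 1 are within range, so pyGetD/pySetD are exact here.
def pvStepA (n : Int) (out : List Int) (i : Int) : List Int :=
  if PySem.List.pyGetD out i 0 ≠ 1 then out
  else
    let left := decide (i > 0) && decide (PySem.List.pyGetD out (i - 1) 0 = 1)
    let right := decide (i < n - 1) && decide (PySem.List.pyGetD out (i + 1) 0 = 1)
    if !(left || right) then PySem.List.pySetD out i 0 else out

def prune_isolated_ones (binary_labels : List Int) : List Int :=
  let n : Int := binary_labels.length
  (PySem.List.pyRange 0 n 1).foldl (pvStepA n) binary_labels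

-- ===== PORT B =====
-- run length of leading 1s (B's inner while loop)
def pvCountOnes : List Int → Nat
  | [] => 0
  | x :: rest => if x = 1 then pvCountOnes rest + 1 else 0

def pvAltGo : List Int → List Int
  | [] => []
  | x :: rest =>
    if x = 1 then
      let k := pvCountOnes (x :: rest)
      (if 2 ≤ k then List.replicate k 1 else [0]) ++ pvAltGo (rest.drop (k - 1))
    else
      x :: pvAltGo rest
termination_by l => l.length
decreasing_by
  · simp only [List.length_cons]
    simp only [List.length_drop]
    omega
  · simp

def prune_isolated_ones_alt (binary_labels : List Int) : List Int :=
  pvAltGo binary_labels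

-- ===== PRECONDITION & SPEC =====
def Spec_prune_isolated_ones (binary_labels : List Int) (out : List Int) : Prop := out = prune_isolated_ones_alt binary_labels
instance (binary_labels : List Int) (out : List Int) : Decidable (Spec_prune_isolated_ones binary_labels out) := by unfold Spec_prune_isolated_ones; infer_instance

-- ===== CLAIM (what is proved, stated in full; the proofs are below) =====
def Claim_equal_prune_isolated_ones : Prop := ∀ (binary_labels : List Int), Dom_prune_isolated_ones binary_labels → Spec_prune_isolated_ones binary_labels (prune_isolated_ones binary_labels)

-- ===== LEMMAS AND PROOFS =====

-- Common reference function: processes the list left to right carrying whether the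
-- (already-processed) previous element equals 1.
def pvGoA (prev : Bool) : List Int → List Int
  | [] => []
  | x :: rest =>
    let x' := if x = 1 ∧ prev = false ∧ rest.head? ≠ some 1 then 0 else x
    x' :: pvGoA (decide (x' = 1)) rest

lemma pvGoA_of_head_ne (prev : Bool) (xs : List Int) (h : xs.head? ≠ some 1) :
    pvGoA prev xs = pvGoA false xs := by
  cases xs with
  | nil => rfl
  | cons y r =>
    have hy : y ≠ 1 := by simpa using h
    simp [pvGoA, hy]

lemma pvGoA_true_replicate (m : Nat) (tail : List Int) (h : tail.head? ≠ some 1) :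
    pvGoA true (List.replicate m 1 ++ tail) = List.replicate m 1 ++ pvGoA false tail := by
  induction m with
  | zero => simpa using pvGoA_of_head_ne true tail h
  | succ m ih => simp [pvGoA, List.replicate_succ, ih]

lemma pvCountOnes_spec (xs : List Int) :
    xs = List.replicate (pvCountOnes xs) 1 ++ xs.drop (pvCountOnes xs) ∧
      (xs.drop (pvCountOnes xs)).head? ≠ some 1 := by
  induction xs with
  | nil => simp [pvCountOnes]
  | cons x rest ih =>
    by_cases hx : x = 1
    · constructor
      · conv_lhs => rw [ih.1]
        simp [pvCountOnes, hx, List.replicate_succ]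
      · simpa [pvCountOnes, hx] using ih.2
    · simp [pvCountOnes, hx]

lemma pvAltGo_eq_pvGoA : ∀ (xs : List Int), pvAltGo xs = pvGoA false xs := by
  have main : ∀ (n : Nat) (xs : List Int), xs.length ≤ n → pvAltGo xs = pvGoA false xs := by
    intro n
    induction n with
    | zero => intro xs h; simp at h; simp [h, pvAltGo, pvGoA]
    | succ n ih =>
      intro xs hlen
      cases xs with
      | nil => simp [pvAltGo, pvGoA]
      | cons x rest =>
        by_cases hx : x = 1
        · subst hx
          have hcnt : pvCountOnes (1 :: rest) = pvCountOnes rest + 1 := by simp [pvCountOnes]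
          obtain ⟨hdecomp, hhead⟩ := pvCountOnes_spec ((1 : Int) :: rest)
          rw [hcnt, List.drop_succ_cons] at hdecomp hhead
          rw [pvAltGo, if_pos rfl, hcnt]
          generalize hm : pvCountOnes rest = m at hdecomp hhead ⊢
          have hrest : rest = List.replicate m 1 ++ rest.drop m := by
            have := congrArg List.tail hdecomp
            simpa [List.replicate_succ] using this
          have hlen2 : (rest.drop m).length ≤ n := by
            simp only [List.length_cons] at hlen
            simp only [List.length_drop]
            omega
          by_cases h2 : 1 ≤ m
          · have hheadr : rest.head? = some 1 := by
              conv_lhs => rw [hrest]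
              cases m with
              | zero => omega
              | succ m' => simp [List.replicate_succ]
            show (if 2 ≤ m + 1 then List.replicate (m + 1) 1 else [0]) ++
                pvAltGo (List.drop (m + 1 - 1) rest) = pvGoA false (1 :: rest)
            rw [if_pos (by omega : 2 ≤ m + 1)]
            have hd : m + 1 - 1 = m := by omega
            rw [hd, ih _ hlen2, pvGoA]
            simp only [hheadr, ne_eq, not_true_eq_false, and_false, if_false]
            simp only [decide_true]
            conv_rhs => rw [hrest]
            rw [pvGoA_true_replicate m _ hhead]
            simp [List.replicate_succ]
          · have hm0 : m = 0 := by omega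
            subst hm0
            show (if 2 ≤ 0 + 1 then List.replicate (0 + 1) 1 else [0]) ++
                pvAltGo (List.drop (0 + 1 - 1) rest) = pvGoA false (1 :: rest)
            rw [if_neg (by omega)]
            simp only [Nat.sub_self, List.drop_zero] at hhead ⊢
            rw [ih _ (by simpa using hlen2), pvGoA]
            simp [hhead]
        · have hlen2 : rest.length ≤ n := by simp at hlen; omega
          rw [pvAltGo, if_neg hx, pvGoA]
          simp only [hx, false_and, if_false, decide_false]
          rw [ih _ hlen2]
  exact fun xs => main xs.length xs le_rfl

-- A's loop over indices [pre.length, pre.length+suf.length) on state pre ++ suf,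
-- where pre is the already-processed prefix.
lemma pvA_loop (suf : List Int) : ∀ (pre : List Int) (n : Int),
    n = ((pre.length + suf.length : Nat) : Int) →
    (List.range' pre.length suf.length).foldl (fun (out : List Int) (k : Nat) => pvStepA n out (k : Int)) (pre ++ suf)
      = pre ++ pvGoA (decide (pre.getLast? = some 1)) suf := by
  induction suf with
  | nil => intro pre n hn; simp [pvGoA]
  | cons x rest ih =>
    intro pre n hn
    simp only [List.length_cons]
    rw [List.range'_succ, List.foldl_cons]
    have hget : PySem.List.pyGetD (pre ++ x :: rest) (pre.length : Int) 0 = x := by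
      simp [List.getD]
    have hright : PySem.List.pyGetD (pre ++ x :: rest) ((pre.length : Int) + 1) 0
        = rest.headD 0 := by
      have hc : ((pre.length : Int) + 1) = ((pre.length + 1 : Nat) : Int) := by push_cast; ring
      rw [hc, PySem.List.pyGetD_natCast]
      cases rest with
      | nil => simp [List.getD]
      | cons y r => simp [List.getD]
    have hrightb : (decide ((pre.length : Int) < n - 1) &&
        decide (PySem.List.pyGetD (pre ++ x :: rest) ((pre.length : Int) + 1) 0 = 1))
        = decide (rest.head? = some 1) := by
      rw [hright]
      cases rest with
      | nil => simp [hn]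
      | cons y r =>
        have hlt : ((pre.length : Int) < n - 1) := by rw [hn]; push_cast; simp; omega
        simp [hlt]
    have hleftb : (decide ((pre.length : Int) > 0) &&
        decide (PySem.List.pyGetD (pre ++ x :: rest) ((pre.length : Int) - 1) 0 = 1))
        = decide (pre.getLast? = some 1) := by
      rcases List.eq_nil_or_concat pre with rfl | ⟨q, a, rfl⟩
      · simp
      · simp only [List.concat_eq_append]
        have hpos : ((q ++ [a]).length : Int) > 0 := by simp
        have hidx : ((q ++ [a]).length : Int) - 1 = ((q.length : Nat) : Int) := by simp
        rw [hidx, PySem.List.pyGetD_natCast]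
        simp [List.getD, List.append_assoc]
    set x' : Int := if x = 1 ∧ (decide (pre.getLast? = some 1)) = false ∧ rest.head? ≠ some 1
        then 0 else x with hx'
    have hstep : pvStepA n (pre ++ x :: rest) ((pre.length : Nat) : Int) = pre ++ x' :: rest := by
      rw [pvStepA]
      by_cases hx1 : x = 1
      · rw [if_neg (by simp [hx1])]
        simp only [hleftb, hrightb]
        by_cases hl : pre.getLast? = some 1
        · simp [hl, hx', hx1]
        · by_cases hr : rest.head? = some 1
          · simp [hl, hr, hx', hx1]
          · simp [hl, hr, hx', hx1]
      · rw [if_pos (by simp [hget, hx1])]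
        simp [hx', hx1]

    rw [hstep]
    have := ih (pre ++ [x']) n (by simp at hn ⊢; omega)
    simp only [List.length_append, List.length_singleton] at this
    rw [show pre ++ x' :: rest = (pre ++ [x']) ++ rest by simp, this, pvGoA]
    have hx'' : x' = if x = 1 ∧ ¬pre.getLast? = some 1 ∧ ¬rest.head? = some 1 then 0 else x := by
      rw [hx']
      congr 1
      simp
    simp [← hx'']

-- ===== VERDICT (by name: the statement is the Claim_ definition above) =====
theorem prune_isolated_ones_spec : Claim_equal_prune_isolated_ones := by
  intro bl _
  unfold Spec_prune_isolated_ones prune_isolated_ones_alt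
  rw [pvAltGo_eq_pvGoA]
  show (PySem.List.pyRange 0 (bl.length : Int) 1).foldl (pvStepA (bl.length : Int)) bl
      = pvGoA false bl
  have h := pvA_loop bl [] ((bl.length : Nat) : Int) (by simp)
  simp only [List.nil_append, List.length_nil, List.getLast?_nil] at h
  rw [PySem.List.pyRange_one, List.foldl_map]
  simp only [sub_zero, Int.toNat_natCast, List.range_eq_range', zero_add]
  simpa using h
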